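-- pv_equiv track=rewrite | github.com/GundalaNikhil/DSA | dsa-problems/AdvancedGraphs/solutions/python/AGR-015-directed-cycle-basis.py | cycle_basis
-- ===== SOURCE A (Python) =====
-- from collections import deque
--
-- def cycle_basis(n: int, edges: list[tuple[int, int]]) -> list[list[int]]:
--     m = len(edges)
--     adj = [[] for _ in range(n)]
--     for i, (u, v) in enumerate(edges):
--         adj[u].append((v, i))
--
--     # Calc basis size
--     undir_adj = [[] for _ in range(n)]
--     for u, v in edges:
--         undir_adj[u].append(v)
--         undir_adj[v].append(u)
--
--     visited = [False] * n
--     c = 0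
--     for i in range(n):
--         if not visited[i]:
--             c += 1
--             q = [i]
--             visited[i] = True
--             while q:
--                 u = q.pop()
--                 for v in undir_adj[u]:
--                     if not visited[v]:
--                         visited[v] = True
--                         q.append(v)
--
--     D = m - n + c
--
--     basis = [None] * m
--     result = []
--
--     def get_path(start, target):
--         if start == target: return []
--         parent = [-1] * n
--         parent_edge = [-1] * n
--         q = deque([start])
--         parent[start] = start
--
--         while q:
--             u = q.popleft()
--             if u == target: break
--             for v, idx in adj[u]:
--                 if parent[v] == -1:
--                     parent[v] = u
--                     parent_edge[v] = idx
--                     q.append(v)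
--
--         if parent[target] == -1: return None
--
--         path = []
--         curr = target
--         while curr != start:
--             path.append(parent_edge[curr])
--             curr = parent[curr]
--         return path[::-1]
--
--     for i in range(m):
--         if len(result) == D: break
--
--         u, v = edges[i]
--         path = get_path(v, u)
--         if path is None: continue
--
--         # Vector
--         vec = 0
--         vec |= (1 << i)
--         for idx in path:
--             vec |= (1 << idx)
--
--         # Insert
--         temp_vec = vec
--         inserted = False
--         # Find pivot
--         # We iterate bits from low to high or high to low?
--         # Use low to high (0 to m-1)
--         for bit in range(m):
--             if (temp_vec >> bit) & 1:
--                 if basis[bit] is None: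
--                     basis[bit] = temp_vec
--                     inserted = True
--                     break
--                 else:
--                     temp_vec ^= basis[bit]
--
--         if inserted:
--             cycle = [u, v]
--             curr = v
--             for idx in path:
--                 # Edge idx is x->y. curr is x.
--                 # We need y.
--                 next_node = edges[idx][1]
--                 cycle.append(next_node)
--                 curr = next_node
--             result.append(cycle)
--
--     return result
-- ===== SOURCE B (Python) =====
-- from collections import deque
--
-- def cycle_basis(n: int, edges: list[tuple[int, int]]) -> list[list[int]]:
--     m = len(edges)
--     adj = [[] for _ in range(n)]
--     for i, (u, v) in enumerate(edges):
--         adj[u].append((v, i))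
--
--     # basis dimension D = m - n + (number of weakly connected components)
--     undir_adj = [[] for _ in range(n)]
--     for u, v in edges:
--         undir_adj[u].append(v)
--         undir_adj[v].append(u)
--     visited = [False] * n
--     c = 0
--     for s in range(n):
--         if not visited[s]:
--             c += 1
--             stack = [s]
--             visited[s] = True
--             while stack:
--                 x = stack.pop()
--                 for y in undir_adj[x]:
--                     if not visited[y]:
--                         visited[y] = True
--                         stack.append(y)
--     D = m - n + c
--
--     # One full BFS tree per distinct edge head, computed once and reused
--     # for every edge that starts its path search at that node.
--     def bfs_tree(s):
--         parent = [-1] * n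
--         parent_edge = [-1] * n
--         parent[s] = s
--         q = deque([s])
--         while q:
--             x = q.popleft()
--             for y, idx in adj[x]:
--                 if parent[y] == -1:
--                     parent[y] = x
--                     parent_edge[y] = idx
--                     q.append(y)
--         return parent, parent_edge
--
--     trees = {}
--     for _, v in edges:
--         if v not in trees:
--             trees[v] = bfs_tree(v)
--
--     pivot = {}  # pivot bit -> reduced GF(2) row
--     result = []
--     for i, (u, v) in enumerate(edges):
--         if len(result) == D:
--             break
--         parent, parent_edge = trees[v]
--         if parent[u] == -1:
--             continue
--         # edge-index path v -> u, collected backwards then reversed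
--         rev = []
--         curr = u
--         while curr != v:
--             rev.append(parent_edge[curr])
--             curr = parent[curr]
--         vec = 1 << i
--         for idx in rev:
--             vec |= 1 << idx
--         temp = vec
--         for bit in range(m):
--             if (temp >> bit) & 1:
--                 if bit in pivot:
--                     temp ^= pivot[bit]
--                 else:
--                     pivot[bit] = temp
--                     result.append([u, v] + [edges[idx][1] for idx in reversed(rev)])
--                     break
--     return result
-- ===== Notes on version B (the rewrite author's own statement) =====
-- stated objective: alternative
-- what changed: B replaces A's per-edge early-terminated BFS with one full BFS tree per distinct edge head, computed once into a dict and reused for every edge whose path search starts there, and keeps the GF(2) pivots in a dict keyed by bit instead of A's length-m list of Optionals.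
-- outside the precondition, e.g. on cycle_basis(2, [(-1, -1)]): A returns [[-1, -1]], B does not finish within the time limit; on cycle_basis(2, [(-1, 0), (0, 1)]): A returns [[-1, 0, 1]], B returns [[-1, 0, 1]]
import Mathlib
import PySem

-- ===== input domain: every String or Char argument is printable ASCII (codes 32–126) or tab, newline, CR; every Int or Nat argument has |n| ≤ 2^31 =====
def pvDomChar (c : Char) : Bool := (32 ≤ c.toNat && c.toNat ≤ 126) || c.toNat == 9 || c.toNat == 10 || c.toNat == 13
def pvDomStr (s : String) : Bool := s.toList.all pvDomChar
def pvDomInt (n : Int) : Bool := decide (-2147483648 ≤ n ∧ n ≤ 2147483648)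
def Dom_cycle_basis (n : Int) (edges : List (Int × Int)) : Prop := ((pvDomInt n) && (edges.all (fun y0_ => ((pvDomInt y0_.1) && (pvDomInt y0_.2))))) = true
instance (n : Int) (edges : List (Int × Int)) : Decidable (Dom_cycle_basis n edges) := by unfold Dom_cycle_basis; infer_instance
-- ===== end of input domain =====

-- B replaces A's per-edge early-terminated BFS by one full BFS tree per distinct edge
-- head, computed once and reused (and keeps GF(2) pivots in a dict instead of an
-- Optional list): an alternative algorithm of similar measured cost.

-- ===== PORT A =====
-- helpers shared by both ports: this code is textually identical in Source A and Source B
-- (adjacency building, weak-component counting, the BFS inner step, parent-chain walk).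

-- adj = [[] for _ in range(n)]; for i,(u,v) in enumerate(edges): adj[u].append((v,i))
def pvAdj (n : Int) (edges : List (Int × Int)) : List (List (Int × Int)) :=
  (edges.zipIdx).foldl
    (fun adj ei =>
      PySem.List.pySetD adj ei.1.1
        (PySem.List.pyGetD adj ei.1.1 [] ++ [(ei.1.2, (ei.2 : Int))]))
    (List.replicate n.toNat [])

-- undir_adj with both directions appended, in statement order
def pvUndir (n : Int) (edges : List (Int × Int)) : List (List Int) :=
  edges.foldl
    (fun und e =>
      let und1 := PySem.List.pySetD und e.1 (PySem.List.pyGetD und e.1 [] ++ [e.2])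
      PySem.List.pySetD und1 e.2 (PySem.List.pyGetD und1 e.2 [] ++ [e.1]))
    (List.replicate n.toNat [])

-- the `while q:` DFS stack loop of the component count (fuel n+1 covers all pops)
def pvDfs (undir : List (List Int)) : Nat → List Bool → List Int → List Bool
  | 0, vis, _ => vis
  | _ + 1, vis, [] => vis
  | f + 1, vis, x :: st =>
      let r := (PySem.List.pyGetD undir x []).foldl
        (fun (vs : List Bool × List Int) y =>
          if PySem.List.pyGetD vs.1 y true then vs
          else (PySem.List.pySetD vs.1 y true, y :: vs.2)) (vis, st)
      pvDfs undir f r.1 r.2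

-- number of weakly connected components
def pvCount (n : Int) (undir : List (List Int)) : Int :=
  ((PySem.List.pyRange 0 n).foldl
    (fun (vc : List Bool × Int) s =>
      if PySem.List.pyGetD vc.1 s true then vc
      else (pvDfs undir (n.toNat + 1) (PySem.List.pySetD vc.1 s true) [s], vc.2 + 1))
    (List.replicate n.toNat false, 0)).2

-- BFS relaxation of one out-edge (y, idx) of the popped node x
def pvRelax (x : Int) (st : List Int × List Int × List Int) (yi : Int × Int) :
    List Int × List Int × List Int :=
  if PySem.List.pyGetD st.1 yi.1 0 = -1 then
    (PySem.List.pySetD st.1 yi.1 x, PySem.List.pySetD st.2.1 yi.1 yi.2, st.2.2 ++ [yi.1])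
  else st

-- BFS body for one popped node x: state = (parent, parent_edge, queue)
def pvBfsStep (adj : List (List (Int × Int))) (s : List Int × List Int × List Int) (x : Int) :
    List Int × List Int × List Int :=
  (PySem.List.pyGetD adj x []).foldl (pvRelax x) s

-- `while curr != start: path.append(parent_edge[curr]); curr = parent[curr]`
def pvWalk (par pe : List Int) (start : Int) : Nat → Int → List Int
  | 0, _ => []
  | f + 1, curr =>
      if curr = start then []
      else PySem.List.pyGetD pe curr 0 :: pvWalk par pe start f (PySem.List.pyGetD par curr 0)

-- initial BFS state: parent[start] = start, queue = deque([start])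
def pvInit (n : Int) (start : Int) : List Int × List Int × List Int :=
  (PySem.List.pySetD (List.replicate n.toNat (-1)) start start,
   List.replicate n.toNat (-1), [start])

-- A-side: BFS with early `if u == target: break`
def pvBfsA (adj : List (List (Int × Int))) (target : Int) :
    Nat → (List Int × List Int × List Int) → List Int × List Int × List Int
  | 0, s => s
  | f + 1, s =>
      match s.2.2 with
      | [] => s
      | x :: q =>
          if x = target then (s.1, s.2.1, q)
          else pvBfsA adj target f (pvBfsStep adj (s.1, s.2.1, q) x)

-- A's get_path(start, target)
def pvGetPathA (n : Int) (adj : List (List (Int × Int))) (start target : Int) :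
    Option (List Int) :=
  if start = target then some []
  else
    let s := pvBfsA adj target (n.toNat + 1) (pvInit n start)
    if PySem.List.pyGetD s.1 target 0 = -1 then none
    else some ((pvWalk s.1 s.2.1 start (n.toNat + 1) target).reverse)

-- A's elimination: basis is a list of Optionals indexed by pivot bit
def pvInsertA : List (Option Nat) → Nat → List Int → List (Option Nat) × Bool
  | basis, _, [] => (basis, false)
  | basis, temp, bit :: rest =>
      if (temp >>> bit.toNat) &&& 1 = 1 then
        match PySem.List.pyGetD basis bit none with
        | none => (PySem.List.pySetD basis bit (some temp), true)
        | some b => pvInsertA basis (temp ^^^ b) rest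
      else pvInsertA basis temp rest

-- A's main loop over i in range(m), with the `len(result) == D` break
def pvMainA (n : Int) (edges : List (Int × Int)) (adj : List (List (Int × Int))) (D : Int) :
    List Int → List (Option Nat) → List (List Int) → List (List Int)
  | [], _, result => result
  | i :: rest, basis, result =>
      if (result.length : Int) = D then result
      else
        let e := PySem.List.pyGetD edges i (0, 0)
        match pvGetPathA n adj e.2 e.1 with
        | none => pvMainA n edges adj D rest basis result
        | some path =>
            let vec : Nat := path.foldl (fun w idx => w ||| (1 <<< idx.toNat)) (1 <<< i.toNat)
            let ins := pvInsertA basis vec (PySem.List.pyRange 0 (edges.length : Int))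
            if ins.2 then
              let cyc := (path.foldl
                (fun (cc : List Int × Int) idx =>
                  (cc.1 ++ [(PySem.List.pyGetD edges idx (0, 0)).2],
                   (PySem.List.pyGetD edges idx (0, 0)).2))
                ([e.1, e.2], e.2)).1
              pvMainA n edges adj D rest ins.1 (result ++ [cyc])
            else pvMainA n edges adj D rest ins.1 result

def cycle_basis (n : Int) (edges : List (Int × Int)) : List (List Int) :=
  let adj := pvAdj n edges
  let c := pvCount n (pvUndir n edges)
  let D := (edges.length : Int) - n + c
  pvMainA n edges adj D (PySem.List.pyRange 0 (edges.length : Int))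
    (List.replicate edges.length none) []

-- ===== PORT B =====
-- B-side: one FULL BFS (no early break, no target) …
def pvBfsB (adj : List (List (Int × Int))) :
    Nat → (List Int × List Int × List Int) → List Int × List Int × List Int
  | 0, s => s
  | f + 1, s =>
      match s.2.2 with
      | [] => s
      | x :: q => pvBfsB adj f (pvBfsStep adj (s.1, s.2.1, q) x)

-- … giving bfs_tree(s) = (parent, parent_edge)
def pvTreeB (n : Int) (adj : List (List (Int × Int))) (s : Int) : List Int × List Int :=
  let r := pvBfsB adj (n.toNat + 1) (pvInit n s)
  (r.1, r.2.1)

-- trees = {}; for _, v in edges: if v not in trees: trees[v] = bfs_tree(v)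
def pvTreesB (n : Int) (adj : List (List (Int × Int))) (edges : List (Int × Int)) :
    PySem.Dict Int (List Int × List Int) :=
  edges.foldl
    (fun d e => if d.contains e.2 then d else d.insert e.2 (pvTreeB n adj e.2))
    PySem.Dict.empty

-- B's elimination: pivot bit -> row dictionary
def pvInsertB : PySem.Dict Int Nat → Nat → List Int → PySem.Dict Int Nat × Bool
  | piv, _, [] => (piv, false)
  | piv, temp, bit :: rest =>
      if (temp >>> bit.toNat) &&& 1 = 1 then
        match piv.get? bit with
        | some b => pvInsertB piv (temp ^^^ b) rest
        | none => (piv.insert bit temp, true)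
      else pvInsertB piv temp rest

-- B's main loop over enumerate(edges), reusing the precomputed tree of each head
def pvMainB (n : Int) (edges : List (Int × Int)) (adj : List (List (Int × Int)))
    (trees : PySem.Dict Int (List Int × List Int)) (D : Int) :
    List ((Int × Int) × Nat) → PySem.Dict Int Nat → List (List Int) → List (List Int)
  | [], _, result => result
  | (e, i) :: rest, piv, result =>
      if (result.length : Int) = D then result
      else
        -- trees[e.2]: the key is always present (every head was inserted above)
        let t := (trees.get? e.2).getD ([], [])
        if PySem.List.pyGetD t.1 e.1 0 = -1 then pvMainB n edges adj trees D rest piv result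
        else
          let rev := pvWalk t.1 t.2 e.2 (n.toNat + 1) e.1
          let vec : Nat := rev.foldl (fun w idx => w ||| (1 <<< idx.toNat)) (1 <<< i)
          let ins := pvInsertB piv vec (PySem.List.pyRange 0 (edges.length : Int))
          if ins.2 then
            pvMainB n edges adj trees D rest ins.1
              (result ++ [[e.1, e.2] ++
                rev.reverse.map (fun idx => (PySem.List.pyGetD edges idx (0, 0)).2)])
          else pvMainB n edges adj trees D rest ins.1 result

def cycle_basis_alt (n : Int) (edges : List (Int × Int)) : List (List Int) :=
  let adj := pvAdj n edges
  let c := pvCount n (pvUndir n edges)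
  let D := (edges.length : Int) - n + c
  pvMainB n edges adj (pvTreesB n adj edges) D edges.zipIdx PySem.Dict.empty []

-- ===== PRECONDITION & SPEC =====
-- Pre_ restricts to the graph's natural domain: 0 ≤ n and every endpoint in [0, n).
-- An endpoint ≥ n makes A raise IndexError; a negative endpoint is outside the natural
-- node domain and only reaches a value through Python's negative-index wraparound
-- (which the Lean ports do not model).
def Pre_cycle_basis (n : Int) (edges : List (Int × Int)) : Prop :=
  0 ≤ n ∧ ∀ e ∈ edges, (0 ≤ e.1 ∧ e.1 < n) ∧ (0 ≤ e.2 ∧ e.2 < n)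
instance (n : Int) (edges : List (Int × Int)) : Decidable (Pre_cycle_basis n edges) := by
  unfold Pre_cycle_basis; infer_instance

def pvWitness_cycle_basis : Int × (List (Int × Int)) := (3, [(0, 1), (1, 2), (2, 0)])

def Spec_cycle_basis (n : Int) (edges : List (Int × Int)) (out : List (List Int)) : Prop :=
  out = cycle_basis_alt n edges
instance (n : Int) (edges : List (Int × Int)) (out : List (List Int)) :
    Decidable (Spec_cycle_basis n edges out) := by unfold Spec_cycle_basis; infer_instance

-- ===== CLAIM (what is proved, stated in full; the proofs are below) =====
def Claim_equal_cycle_basis : Prop :=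
  ∀ (n : Int) (edges : List (Int × Int)), Dom_cycle_basis n edges →
    Pre_cycle_basis n edges → Spec_cycle_basis n edges (cycle_basis n edges)

-- ===== LEMMAS AND PROOFS =====

-- indexing helpers
theorem pv_getD_set {α : Type} (xs : List α) (i j : Int) (v d : α)
    (hi0 : 0 ≤ i) (_hi : i < (xs.length : Int)) (hj0 : 0 ≤ j) (hj : j < (xs.length : Int)) :
    PySem.List.pyGetD (PySem.List.pySetD xs i v) j d =
      if j = i then v else PySem.List.pyGetD xs j d := by
  rw [PySem.List.pySetD_of_nonneg xs v hi0]
  rw [PySem.List.pyGetD_eq_getElem _ d hj0 (by simpa using hj)]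
  rw [List.getElem_set]
  by_cases h : j = i
  · simp [h]
  · have : ¬ i.toNat = j.toNat := by omega
    rw [if_neg this, if_neg h, PySem.List.pyGetD_eq_getElem _ d hj0 hj]

theorem pv_getD_replicate {α : Type} (n : Nat) (a d : α) (j : Int)
    (hj0 : 0 ≤ j) (hj : j < (n : Int)) :
    PySem.List.pyGetD (List.replicate n a) j d = a := by
  rw [PySem.List.pyGetD_eq_getElem _ d hj0 (by simpa using hj)]
  simp

theorem pv_mem_getD_nil {α : Type} (xs : List (List α)) (i : Int) (p : α)
    (hp : p ∈ PySem.List.pyGetD xs i []) : ∃ l ∈ xs, p ∈ l := by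
  have h0 : PySem.List.pyGetD xs i [] = (PySem.List.pyGet? xs i).getD [] := rfl
  rw [h0] at hp
  cases h : PySem.List.pyGet? xs i with
  | none => rw [h] at hp; simp at hp
  | some l =>
      rw [h] at hp
      exact ⟨l, PySem.List.mem_of_pyGet?_eq_some _ h, hp⟩

theorem pv_mem_pySetD {α : Type} (xs : List α) (i : Int) (v x : α)
    (hx : x ∈ PySem.List.pySetD xs i v) : x ∈ xs ∨ x = v := by
  unfold PySem.List.pySetD PySem.List.pySet? at hx
  cases h : PySem.List.pyIdx? xs.length i with
  | none => rw [h] at hx; simp at hx; exact Or.inl hx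
  | some k =>
      rw [h] at hx; simp at hx
      exact List.mem_or_eq_of_mem_set hx

-- every target stored in the adjacency lists is a real in-range node
def pvGoodAdj (n : Int) (adj : List (List (Int × Int))) : Prop :=
  ∀ (x : Int), ∀ p ∈ PySem.List.pyGetD adj x [], 0 ≤ p.1 ∧ p.1 < n

theorem pvAdj_good (n : Int) (edges : List (Int × Int))
    (hpre : Pre_cycle_basis n edges) : pvGoodAdj n (pvAdj n edges) := by
  obtain ⟨-, hed⟩ := hpre
  have key : ∀ (l : List ((Int × Int) × Nat)) (acc : List (List (Int × Int))),
      (∀ e ∈ l, 0 ≤ e.1.2 ∧ e.1.2 < n) →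
      (∀ li ∈ acc, ∀ p ∈ li, 0 ≤ p.1 ∧ p.1 < n) →
      ∀ li ∈ l.foldl
        (fun adj ei => PySem.List.pySetD adj ei.1.1
          (PySem.List.pyGetD adj ei.1.1 [] ++ [(ei.1.2, (ei.2 : Int))])) acc,
        ∀ p ∈ li, 0 ≤ p.1 ∧ p.1 < n := by
    intro l
    induction l with
    | nil => intro acc _ hacc; simpa using hacc
    | cons ei rest ih =>
        intro acc hl hacc
        simp only [List.foldl_cons]
        apply ih _ (fun e he => hl e (List.mem_cons_of_mem _ he))
        intro li hli p hp
        rcases pv_mem_pySetD _ _ _ _ hli with h | h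
        · exact hacc li h p hp
        · subst h
          rcases List.mem_append.1 hp with h | h
          · obtain ⟨l0, hl0, hpl0⟩ := pv_mem_getD_nil _ _ _ h
            exact hacc l0 hl0 p hpl0
          · simp at h; subst h
            exact hl ei List.mem_cons_self
  intro x p hp
  obtain ⟨l0, hl0, hpl0⟩ := pv_mem_getD_nil _ _ _ hp
  refine key edges.zipIdx (List.replicate n.toNat []) ?_ ?_ l0 hl0 p hpl0
  · intro e he
    have hm : e.1 ∈ edges := List.fst_mem_of_mem_zipIdx he
    exact (hed e.1 hm).2
  · intro li hli; simp [List.eq_of_mem_replicate hli]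

-- parent/parent_edge entries already set are final: BFS never overwrites them
def pvPres (n : Int) (s t : List Int × List Int × List Int) : Prop :=
  ∀ j : Int, 0 ≤ j → j < n → PySem.List.pyGetD s.1 j 0 ≠ -1 →
    PySem.List.pyGetD t.1 j 0 = PySem.List.pyGetD s.1 j 0 ∧
    PySem.List.pyGetD t.2.1 j 0 = PySem.List.pyGetD s.2.1 j 0

-- set parent entries point at in-range, themselves-set nodes
def pvInvPar (n : Int) (par : List Int) : Prop :=
  ∀ j : Int, 0 ≤ j → j < n → PySem.List.pyGetD par j 0 ≠ -1 →
    0 ≤ PySem.List.pyGetD par j 0 ∧ PySem.List.pyGetD par j 0 < n ∧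
    PySem.List.pyGetD par (PySem.List.pyGetD par j 0) 0 ≠ -1

-- full BFS state invariant
def pvInv (n : Int) (s : List Int × List Int × List Int) : Prop :=
  s.1.length = n.toNat ∧ s.2.1.length = n.toNat ∧ pvInvPar n s.1 ∧
  ∀ x ∈ s.2.2, 0 ≤ x ∧ x < n ∧ PySem.List.pyGetD s.1 x 0 ≠ -1

theorem pvPres_refl (n : Int) (s : List Int × List Int × List Int) : pvPres n s s :=
  fun _ _ _ _ => ⟨rfl, rfl⟩

theorem pvPres_trans {n : Int} {s t u : List Int × List Int × List Int}
    (h1 : pvPres n s t) (h2 : pvPres n t u) : pvPres n s u := by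
  intro j hj0 hjn hset
  obtain ⟨ha, hb⟩ := h1 j hj0 hjn hset
  obtain ⟨hc, hd⟩ := h2 j hj0 hjn (ha ▸ hset)
  exact ⟨hc.trans ha, hd.trans hb⟩

theorem pvInv_queue_tail {n : Int} {par pe : List Int} {x : Int} {q : List Int}
    (h : pvInv n (par, pe, x :: q)) : pvInv n (par, pe, q) :=
  ⟨h.1, h.2.1, h.2.2.1, fun z hz => h.2.2.2 z (List.mem_cons_of_mem _ hz)⟩

theorem pvStep_fold {n x : Int} :
    ∀ (l : List (Int × Int)), (∀ p ∈ l, 0 ≤ p.1 ∧ p.1 < n) →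
    ∀ s, pvInv n s → 0 ≤ x → x < n → PySem.List.pyGetD s.1 x 0 ≠ -1 →
      pvInv n (l.foldl (pvRelax x) s) ∧ pvPres n s (l.foldl (pvRelax x) s) ∧
        PySem.List.pyGetD (l.foldl (pvRelax x) s).1 x 0 ≠ -1 := by
  intro l
  induction l with
  | nil => intro _ s hs _ _ hxs; exact ⟨hs, pvPres_refl n s, hxs⟩
  | cons p rest ih =>
      intro hl s hs hx0 hxn hxs
      simp only [List.foldl_cons]
      by_cases hgd : PySem.List.pyGetD s.1 p.1 0 = -1
      · -- relax writes parent[p.1] := x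
        obtain ⟨hlen1, hlen2, hpar, hq⟩ := hs
        obtain ⟨hy0, hyn⟩ := hl p List.mem_cons_self
        have hxy : x ≠ p.1 := fun h => hxs (by rw [h]; exact hgd)
        have hrel : pvRelax x s p =
            (PySem.List.pySetD s.1 p.1 x, PySem.List.pySetD s.2.1 p.1 p.2,
             s.2.2 ++ [p.1]) := by
          simp [pvRelax, hgd]
        have hb1 : ∀ j : Int, j < n → j < (s.1.length : Int) := by
          intro j hj
          have := Int.self_le_toNat n
          omega
        have hb2 : ∀ j : Int, j < n → j < (s.2.1.length : Int) := by
          intro j hj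
          have := Int.self_le_toNat n
          omega
        have hpar' : ∀ j : Int, 0 ≤ j → j < n →
            PySem.List.pyGetD (pvRelax x s p).1 j 0 =
              if j = p.1 then x else PySem.List.pyGetD s.1 j 0 := by
          intro j hj0 hjn
          rw [hrel]
          exact pv_getD_set s.1 p.1 j x 0 hy0 (hb1 _ hyn) hj0 (hb1 _ hjn)
        have hpe' : ∀ j : Int, 0 ≤ j → j < n →
            PySem.List.pyGetD (pvRelax x s p).2.1 j 0 =
              if j = p.1 then p.2 else PySem.List.pyGetD s.2.1 j 0 := by
          intro j hj0 hjn
          rw [hrel]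
          exact pv_getD_set s.2.1 p.1 j p.2 0 hy0 (hb2 _ hyn) hj0 (hb2 _ hjn)
        have hpres : pvPres n s (pvRelax x s p) := by
          intro j hj0 hjn hset
          have hjy : j ≠ p.1 := fun h => hset (by rw [h]; exact hgd)
          rw [hpar' j hj0 hjn, if_neg hjy, hpe' j hj0 hjn, if_neg hjy]
          exact ⟨rfl, rfl⟩
        have hxs' : PySem.List.pyGetD (pvRelax x s p).1 x 0 ≠ -1 := by
          rw [hpar' x hx0 hxn, if_neg hxy]; exact hxs
        have hinv' : pvInv n (pvRelax x s p) := by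
          refine ⟨by rw [hrel]; simpa [PySem.List.length_pySetD] using hlen1,
                  by rw [hrel]; simpa [PySem.List.length_pySetD] using hlen2, ?_, ?_⟩
          · intro j hj0 hjn hset
            rw [hpar' j hj0 hjn] at hset ⊢
            by_cases hjy : j = p.1
            · rw [if_pos hjy]
              refine ⟨hx0, hxn, ?_⟩
              rw [hpar' x hx0 hxn, if_neg hxy]; exact hxs
            · rw [if_neg hjy] at hset ⊢
              obtain ⟨ha, hb, hc⟩ := hpar j hj0 hjn hset
              refine ⟨ha, hb, ?_⟩
              have hvy : PySem.List.pyGetD s.1 j 0 ≠ p.1 := by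
                intro h; exact hc (by rw [h]; exact hgd)
              rw [hpar' _ ha hb, if_neg hvy]
              exact hc
          · intro z hz
            rw [hrel] at hz
            simp only [List.mem_append, List.mem_singleton] at hz
            rcases hz with hz | hz
            · obtain ⟨hz0, hzn, hzset⟩ := hq z hz
              refine ⟨hz0, hzn, ?_⟩
              rw [hpar' z hz0 hzn]
              have hzy : z ≠ p.1 := fun h => hzset (by rw [h]; exact hgd)
              rw [if_neg hzy]; exact hzset
            · rw [hz]
              refine ⟨hy0, hyn, ?_⟩
              rw [hpar' p.1 hy0 hyn, if_pos rfl]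
              omega
        obtain ⟨I, P, X⟩ := ih (fun q hq' => hl q (List.mem_cons_of_mem _ hq'))
          (pvRelax x s p) hinv' hx0 hxn hxs'
        exact ⟨I, pvPres_trans hpres P, X⟩
      · have heq : pvRelax x s p = s := by simp [pvRelax, hgd]
        rw [heq]
        exact ih (fun q hq' => hl q (List.mem_cons_of_mem _ hq')) s hs hx0 hxn hxs

theorem pvStep_all {n x : Int} (adj : List (List (Int × Int))) (hg : pvGoodAdj n adj)
    (s : List Int × List Int × List Int) (hs : pvInv n s)
    (hx0 : 0 ≤ x) (hxn : x < n) (hxset : PySem.List.pyGetD s.1 x 0 ≠ -1) :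
    pvInv n (pvBfsStep adj s x) ∧ pvPres n s (pvBfsStep adj s x) ∧
      PySem.List.pyGetD (pvBfsStep adj s x).1 x 0 ≠ -1 :=
  pvStep_fold (PySem.List.pyGetD adj x []) (hg x) s hs hx0 hxn hxset

theorem pvFull_all {n : Int} (adj : List (List (Int × Int))) (hg : pvGoodAdj n adj) :
    ∀ (f : Nat) (s : List Int × List Int × List Int), pvInv n s →
      pvInv n (pvBfsB adj f s) ∧ pvPres n s (pvBfsB adj f s) := by
  intro f
  induction f with
  | zero => intro s hs; exact ⟨hs, pvPres_refl n s⟩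
  | succ f ih =>
      intro s hs
      obtain ⟨par, pe, q⟩ := s
      cases q with
      | nil => exact ⟨hs, pvPres_refl n _⟩
      | cons x q =>
          have hred : pvBfsB adj (f + 1) (par, pe, x :: q) =
              pvBfsB adj f (pvBfsStep adj (par, pe, q) x) := rfl
          rw [hred]
          obtain ⟨hx0, hxn, hxset⟩ := hs.2.2.2 x List.mem_cons_self
          have hs' := pvInv_queue_tail hs
          obtain ⟨I1, P1, _⟩ := pvStep_all adj hg (par, pe, q) hs' hx0 hxn hxset
          obtain ⟨I2, P2⟩ := ih _ I1
          exact ⟨I2, pvPres_trans (pvPres_trans (fun j a b c => ⟨rfl, rfl⟩ : pvPres n (par, pe, x :: q) (par, pe, q)) P1) P2⟩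

theorem pvEarly_all {n : Int} (adj : List (List (Int × Int))) (hg : pvGoodAdj n adj)
    (t : Int) :
    ∀ (f : Nat) (s : List Int × List Int × List Int), pvInv n s →
      pvInv n (pvBfsA adj t f s) ∧
      pvPres n (pvBfsA adj t f s) (pvBfsB adj f s) ∧
      (PySem.List.pyGetD (pvBfsA adj t f s).1 t 0 = -1 → pvBfsA adj t f s = pvBfsB adj f s) := by
  intro f
  induction f with
  | zero => intro s hs; exact ⟨hs, pvPres_refl n s, fun _ => rfl⟩
  | succ f ih =>
      intro s hs
      obtain ⟨par, pe, q⟩ := s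
      cases q with
      | nil => exact ⟨hs, pvPres_refl n _, fun _ => rfl⟩
      | cons x q =>
          obtain ⟨hx0, hxn, hxset⟩ := hs.2.2.2 x List.mem_cons_self
          have hs' := pvInv_queue_tail hs
          by_cases hxt : x = t
          · have hredA : pvBfsA adj t (f + 1) (par, pe, x :: q) = (par, pe, q) := by
              simp [pvBfsA, hxt]
            have hredB : pvBfsB adj (f + 1) (par, pe, x :: q) =
                pvBfsB adj f (pvBfsStep adj (par, pe, q) x) := rfl
            rw [hredA, hredB]
            obtain ⟨I1, P1, _⟩ := pvStep_all adj hg (par, pe, q) hs' hx0 hxn hxset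
            obtain ⟨_, P2⟩ := pvFull_all adj hg f _ I1
            refine ⟨hs', pvPres_trans P1 P2, ?_⟩
            intro habs
            subst hxt
            exact absurd habs (by simpa using hxset)
          · have hredA : pvBfsA adj t (f + 1) (par, pe, x :: q) =
                pvBfsA adj t f (pvBfsStep adj (par, pe, q) x) := by
              simp [pvBfsA, hxt]
            have hredB : pvBfsB adj (f + 1) (par, pe, x :: q) =
                pvBfsB adj f (pvBfsStep adj (par, pe, q) x) := rfl
            rw [hredA, hredB]
            obtain ⟨I1, _, _⟩ := pvStep_all adj hg (par, pe, q) hs' hx0 hxn hxset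
            exact ih _ I1

theorem pvWalk_eq {n : Int} (parE peE parF peF : List Int) (start : Int)
    (hP : pvInvPar n parE)
    (hpres : ∀ j : Int, 0 ≤ j → j < n → PySem.List.pyGetD parE j 0 ≠ -1 →
      PySem.List.pyGetD parF j 0 = PySem.List.pyGetD parE j 0 ∧
      PySem.List.pyGetD peF j 0 = PySem.List.pyGetD peE j 0) :
    ∀ (f : Nat) (curr : Int), 0 ≤ curr → curr < n →
      PySem.List.pyGetD parE curr 0 ≠ -1 →
      pvWalk parE peE start f curr = pvWalk parF peF start f curr := by
  intro f
  induction f with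
  | zero => intro curr _ _ _; rfl
  | succ f ih =>
      intro curr h0 hn hset
      simp only [pvWalk]
      by_cases hc : curr = start
      · simp [hc]
      · rw [if_neg hc, if_neg hc]
        obtain ⟨hpar, hpe⟩ := hpres curr h0 hn hset
        rw [hpar, hpe]
        obtain ⟨h0', hn', hset'⟩ := hP curr h0 hn hset
        rw [ih _ h0' hn' hset']

theorem pvInit_getD {n v j : Int} (hv0 : 0 ≤ v) (hvn : v < n) (hj0 : 0 ≤ j) (hjn : j < n) :
    PySem.List.pyGetD (pvInit n v).1 j 0 = if j = v then v else -1 := by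
  have hlen : ((List.replicate n.toNat (-1) : List Int).length : Int) = (n.toNat : Int) := by
    simp
  have hle := Int.self_le_toNat n
  have h := pv_getD_set (List.replicate n.toNat (-1) : List Int) v j v 0 hv0
    (by omega) hj0 (by omega)
  simp only [pvInit]
  rw [h]
  by_cases hjv : j = v
  · simp [hjv]
  · rw [if_neg hjv, if_neg hjv]
    exact pv_getD_replicate n.toNat (-1) 0 j hj0 (by omega)

theorem pvInit_inv {n v : Int} (hv0 : 0 ≤ v) (hvn : v < n) : pvInv n (pvInit n v) := by
  refine ⟨by simp [pvInit, PySem.List.length_pySetD], by simp [pvInit], ?_, ?_⟩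
  · intro j hj0 hjn hset
    rw [pvInit_getD hv0 hvn hj0 hjn] at hset ⊢
    by_cases hjv : j = v
    · rw [if_pos hjv]
      refine ⟨hv0, hvn, ?_⟩
      rw [pvInit_getD hv0 hvn hv0 hvn, if_pos rfl]
      omega
    · rw [if_neg hjv] at hset
      exact absurd rfl hset
  · intro z hz
    simp only [pvInit, List.mem_singleton] at hz
    subst hz
    refine ⟨hv0, hvn, ?_⟩
    rw [pvInit_getD hv0 hvn hv0 hvn, if_pos rfl]
    omega

theorem pvPath_eq {n u v : Int} (adj : List (List (Int × Int))) (hg : pvGoodAdj n adj)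
    (hu0 : 0 ≤ u) (hun : u < n) (hv0 : 0 ≤ v) (hvn : v < n) :
    pvGetPathA n adj v u =
      (if PySem.List.pyGetD (pvTreeB n adj v).1 u 0 = -1 then none
       else some ((pvWalk (pvTreeB n adj v).1 (pvTreeB n adj v).2 v (n.toNat + 1) u).reverse)) := by
  have hinit := pvInit_inv (n := n) hv0 hvn
  obtain ⟨hInvF, hPresF⟩ := pvFull_all adj hg (n.toNat + 1) (pvInit n v) hinit
  have htree1 : (pvTreeB n adj v).1 = (pvBfsB adj (n.toNat + 1) (pvInit n v)).1 := rfl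
  have htree2 : (pvTreeB n adj v).2 = (pvBfsB adj (n.toNat + 1) (pvInit n v)).2.1 := rfl
  have hiv : PySem.List.pyGetD (pvInit n v).1 v 0 = v := by
    rw [pvInit_getD hv0 hvn hv0 hvn, if_pos rfl]
  have hivne : PySem.List.pyGetD (pvInit n v).1 v 0 ≠ -1 := by rw [hiv]; omega
  have hFv : PySem.List.pyGetD (pvBfsB adj (n.toNat + 1) (pvInit n v)).1 v 0 = v := by
    rw [(hPresF v hv0 hvn hivne).1, hiv]
  by_cases hc : v = u
  · subst hc
    have hguard : ¬ PySem.List.pyGetD (pvTreeB n adj v).1 v 0 = -1 := by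
      rw [htree1, hFv]; omega
    rw [if_neg hguard]
    have hwalk : pvWalk (pvTreeB n adj v).1 (pvTreeB n adj v).2 v (n.toNat + 1) v = [] := by
      simp [pvWalk]
    rw [hwalk]
    simp [pvGetPathA]
  · obtain ⟨hInvE, hPresEF, hEq⟩ := pvEarly_all adj hg u (n.toNat + 1) (pvInit n v) hinit
    have hred : pvGetPathA n adj v u =
        (if PySem.List.pyGetD (pvBfsA adj u (n.toNat + 1) (pvInit n v)).1 u 0 = -1 then none
         else some ((pvWalk (pvBfsA adj u (n.toNat + 1) (pvInit n v)).1
           (pvBfsA adj u (n.toNat + 1) (pvInit n v)).2.1 v (n.toNat + 1) u).reverse)) := by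
      simp only [pvGetPathA, if_neg hc]
    rw [hred]
    by_cases hEu : PySem.List.pyGetD (pvBfsA adj u (n.toNat + 1) (pvInit n v)).1 u 0 = -1
    · rw [if_pos hEu, htree1, ← hEq hEu, if_pos hEu]
    · rw [if_neg hEu]
      have hFu : PySem.List.pyGetD (pvBfsB adj (n.toNat + 1) (pvInit n v)).1 u 0 =
          PySem.List.pyGetD (pvBfsA adj u (n.toNat + 1) (pvInit n v)).1 u 0 :=
        (hPresEF u hu0 hun hEu).1
      have hguard : ¬ PySem.List.pyGetD (pvTreeB n adj v).1 u 0 = -1 := by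
        rw [htree1, hFu]; exact hEu
      rw [if_neg hguard]
      have hwalk := pvWalk_eq (n := n)
        (pvBfsA adj u (n.toNat + 1) (pvInit n v)).1
        (pvBfsA adj u (n.toNat + 1) (pvInit n v)).2.1
        (pvBfsB adj (n.toNat + 1) (pvInit n v)).1
        (pvBfsB adj (n.toNat + 1) (pvInit n v)).2.1
        v hInvE.2.2.1 (fun j a b c => hPresEF j a b c) (n.toNat + 1) u hu0 hun hEu
      rw [htree1, htree2, ← hwalk]

theorem pvTrees_spec {n : Int} (adj : List (List (Int × Int))) (edges : List (Int × Int)) :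
    ∀ e ∈ edges, (pvTreesB n adj edges).get? e.2 = some (pvTreeB n adj e.2) := by
  have T1 : ∀ (l : List (Int × Int)) (d : PySem.Dict Int (List Int × List Int)),
      (∀ k : Int, d.get? k = none ∨ d.get? k = some (pvTreeB n adj k)) →
      ∀ k : Int, (l.foldl (fun d e => if d.contains e.2 then d
          else d.insert e.2 (pvTreeB n adj e.2)) d).get? k = none ∨
        (l.foldl (fun d e => if d.contains e.2 then d
          else d.insert e.2 (pvTreeB n adj e.2)) d).get? k = some (pvTreeB n adj k) := by
    intro l
    induction l with
    | nil => intro d hd k; exact hd k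
    | cons e rest ih =>
        intro d hd k
        simp only [List.foldl_cons]
        apply ih
        intro k'
        by_cases hcont : d.contains e.2
        · rw [if_pos hcont]; exact hd k'
        · rw [if_neg hcont, PySem.Dict.get?_insert]
          by_cases hk : k' = e.2
          · rw [if_pos hk, hk]; exact Or.inr rfl
          · rw [if_neg hk]; exact hd k'
  have T2 : ∀ (l : List (Int × Int)) (d : PySem.Dict Int (List Int × List Int)) (k : Int),
      d.get? k ≠ none →
      (l.foldl (fun d e => if d.contains e.2 then d
        else d.insert e.2 (pvTreeB n adj e.2)) d).get? k ≠ none := by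
    intro l
    induction l with
    | nil => intro d k h; exact h
    | cons e rest ih =>
        intro d k h
        simp only [List.foldl_cons]
        apply ih
        by_cases hcont : d.contains e.2
        · rw [if_pos hcont]; exact h
        · rw [if_neg hcont, PySem.Dict.get?_insert]
          by_cases hk : k = e.2
          · rw [if_pos hk]; simp
          · rw [if_neg hk]; exact h
  have T3 : ∀ (l : List (Int × Int)) (d : PySem.Dict Int (List Int × List Int)) (e : Int × Int),
      e ∈ l →
      (l.foldl (fun d e => if d.contains e.2 then d
        else d.insert e.2 (pvTreeB n adj e.2)) d).get? e.2 ≠ none := by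
    intro l
    induction l with
    | nil => intro d e h; simp at h
    | cons e0 rest ih =>
        intro d e h
        simp only [List.foldl_cons]
        rcases List.mem_cons.1 h with h | h
        · subst h
          apply T2
          by_cases hcont : d.contains e.2
          · rw [if_pos hcont]
            rw [PySem.Dict.contains_eq_isSome_get?] at hcont
            exact Option.isSome_iff_ne_none.1 hcont
          · rw [if_neg hcont, PySem.Dict.get?_insert_self]; simp
        · exact ih _ _ h
  intro e he
  have h1 := T1 edges PySem.Dict.empty (fun k => Or.inl (PySem.Dict.get?_empty k)) e.2
  have h3 := T3 edges PySem.Dict.empty e he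
  unfold pvTreesB
  rcases h1 with h | h
  · exact absurd h h3
  · exact h

-- GF(2) elimination: the Optional list and the pivot dictionary stay pointwise equal
def pvRel (m : Nat) (basis : List (Option Nat)) (piv : PySem.Dict Int Nat) : Prop :=
  basis.length = m ∧ ∀ bit : Int, 0 ≤ bit → bit < (m : Int) →
    PySem.List.pyGetD basis bit none = piv.get? bit

theorem pvInsert_eq (m : Nat) :
    ∀ (bits : List Int), (∀ b ∈ bits, 0 ≤ b ∧ b < (m : Int)) →
    ∀ (basis : List (Option Nat)) (piv : PySem.Dict Int Nat) (temp : Nat), pvRel m basis piv →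
      (pvInsertA basis temp bits).2 = (pvInsertB piv temp bits).2 ∧
      pvRel m (pvInsertA basis temp bits).1 (pvInsertB piv temp bits).1 := by
  intro bits
  induction bits with
  | nil => intro _ basis piv temp hrel; exact ⟨rfl, hrel⟩
  | cons bit rest ih =>
      intro hb basis piv temp hrel
      obtain ⟨hb0, hbm⟩ := hb bit List.mem_cons_self
      have hrest := fun b hb' => hb b (List.mem_cons_of_mem _ hb')
      simp only [pvInsertA, pvInsertB]
      by_cases hbit : (temp >>> bit.toNat) &&& 1 = 1
      · rw [if_pos hbit, if_pos hbit]
        rw [hrel.2 bit hb0 hbm]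
        cases hpg : piv.get? bit with
        | some b => exact ih hrest basis piv (temp ^^^ b) hrel
        | none =>
            refine ⟨rfl, ?_, ?_⟩
            · simpa [PySem.List.length_pySetD] using hrel.1
            · intro bit' h0 hm
              have hlen : ((basis.length : Int)) = (m : Int) := by exact_mod_cast hrel.1
              rw [pv_getD_set basis bit bit' (some temp) none hb0 (by omega) h0 (by omega)]
              rw [PySem.Dict.get?_insert]
              by_cases hbb : bit' = bit
              · rw [if_pos hbb, if_pos hbb]
              · rw [if_neg hbb, if_neg hbb]
                exact hrel.2 bit' h0 hm
      · rw [if_neg hbit, if_neg hbit]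
        exact ih hrest basis piv temp hrel

-- or-folds are insensitive to the traversal order
theorem pv_orfold_shift : ∀ (l : List Int) (s t : Nat),
    l.foldl (fun w idx => w ||| (1 <<< idx.toNat)) (s ||| t) =
      (l.foldl (fun w idx => w ||| (1 <<< idx.toNat)) s) ||| t := by
  intro l
  induction l with
  | nil => intro s t; rfl
  | cons x l ih =>
      intro s t
      simp only [List.foldl_cons]
      have h : s ||| t ||| (1 <<< x.toNat) = s ||| (1 <<< x.toNat) ||| t := by
        rw [Nat.or_assoc, Nat.or_assoc, Nat.or_comm t]
      rw [h, ih]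

theorem pv_orfold_rev (l : List Int) (s : Nat) :
    l.reverse.foldl (fun w idx => w ||| (1 <<< idx.toNat)) s =
      l.foldl (fun w idx => w ||| (1 <<< idx.toNat)) s := by
  induction l generalizing s with
  | nil => rfl
  | cons x l ih =>
      simp only [List.reverse_cons, List.foldl_append, List.foldl_cons, List.foldl_nil, ih]
      rw [← pv_orfold_shift]

theorem pvMain_eq (n : Int) (edges : List (Int × Int)) (adj : List (List (Int × Int)))
    (trees : PySem.Dict Int (List Int × List Int)) (D : Int)
    (hpre : Pre_cycle_basis n edges) (hg : pvGoodAdj n adj)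
    (htrees : ∀ e ∈ edges, trees.get? e.2 = some (pvTreeB n adj e.2)) :
    ∀ (j k : Nat), k + j = edges.length →
    ∀ (basis : List (Option Nat)) (piv : PySem.Dict Int Nat) (res : List (List Int)),
      pvRel edges.length basis piv →
      pvMainA n edges adj D (PySem.List.pyRange (k : Int) (edges.length : Int)) basis res =
        pvMainB n edges adj trees D ((edges.drop k).zipIdx k) piv res := by
  intro j
  induction j with
  | zero =>
      intro k hk basis piv res _
      have hk' : k = edges.length := by omega
      subst hk'
      have h1 : PySem.List.pyRange ((edges.length : Nat) : Int) ((edges.length : Nat) : Int) = [] :=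
        List.eq_nil_iff_forall_not_mem.2
          (fun x hx => by have := PySem.List.mem_pyRange_one.1 hx; omega)
      rw [h1, List.drop_length]
      rfl
  | succ j ih =>
      intro k hk basis piv res hrel
      have hklt : k < edges.length := by omega
      have hcast : ((k : Int)) < ((edges.length : Int)) := by exact_mod_cast hklt
      rw [PySem.List.pyRange_one_cons hcast, List.drop_eq_getElem_cons hklt,
        List.zipIdx_cons]
      simp only [pvMainA, pvMainB]
      by_cases hD : ((res.length : Int)) = D
      · rw [if_pos hD, if_pos hD]
      · rw [if_neg hD, if_neg hD]
        have he : PySem.List.pyGetD edges ((k : Nat) : Int) ((0 : Int), (0 : Int)) = edges[k] := by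
          rw [PySem.List.pyGetD_natCast]
          exact List.getD_eq_getElem edges _ hklt
        rw [he]
        have hmem : edges[k] ∈ edges := List.getElem_mem hklt
        obtain ⟨⟨hu0, hun⟩, hv0, hvn⟩ := hpre.2 edges[k] hmem
        rw [pvPath_eq adj hg hu0 hun hv0 hvn, htrees edges[k] hmem]
        simp only [Option.getD_some]
        by_cases hguard :
            PySem.List.pyGetD (pvTreeB n adj edges[k].2).1 edges[k].1 0 = -1
        · rw [if_pos hguard, if_pos hguard]
          have hc : ((k : Int)) + 1 = (((k + 1 : Nat)) : Int) := by push_cast; ring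
          rw [hc]
          exact ih (k + 1) (by omega) basis piv res hrel
        · rw [if_neg hguard, if_neg hguard]
          have hc : ((k : Int)) + 1 = (((k + 1 : Nat)) : Int) := by push_cast; ring
          have hbits : ∀ b ∈ PySem.List.pyRange 0 (edges.length : Int),
              0 ≤ b ∧ b < ((edges.length : Nat) : Int) := by
            intro b hb
            have := PySem.List.mem_pyRange_one.1 hb
            omega
          obtain ⟨hflag, hrel'⟩ := pvInsert_eq edges.length
            (PySem.List.pyRange 0 (edges.length : Int)) hbits basis piv
            ((pvWalk (pvTreeB n adj edges[k].2).1 (pvTreeB n adj edges[k].2).2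
              edges[k].2 (n.toNat + 1) edges[k].1).foldl
              (fun w idx => w ||| (1 <<< idx.toNat)) (1 <<< k)) hrel
          -- the vector A builds from the reversed path is the same or-fold
          have hvec :
              (pvWalk (pvTreeB n adj edges[k].2).1 (pvTreeB n adj edges[k].2).2
                edges[k].2 (n.toNat + 1) edges[k].1).reverse.foldl
                (fun w idx => w ||| (1 <<< idx.toNat)) (1 <<< ((k : Int)).toNat) =
              (pvWalk (pvTreeB n adj edges[k].2).1 (pvTreeB n adj edges[k].2).2
                edges[k].2 (n.toNat + 1) edges[k].1).foldl
                (fun w idx => w ||| (1 <<< idx.toNat)) (1 <<< k) := by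
            rw [pv_orfold_rev]
            norm_num
          dsimp only
          rw [hvec, hflag]
          by_cases hins : (pvInsertB piv
              ((pvWalk (pvTreeB n adj edges[k].2).1 (pvTreeB n adj edges[k].2).2
                edges[k].2 (n.toNat + 1) edges[k].1).foldl
                (fun w idx => w ||| (1 <<< idx.toNat)) (1 <<< k))
              (PySem.List.pyRange 0 (edges.length : Int))).2 = true
          · rw [if_pos hins, if_pos hins]
            -- A's cycle fold equals [u, v] ++ map over the reversed path
            have hcyc :
                ((pvWalk (pvTreeB n adj edges[k].2).1 (pvTreeB n adj edges[k].2).2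
                  edges[k].2 (n.toNat + 1) edges[k].1).reverse.foldl
                  (fun (cc : List Int × Int) idx =>
                    (cc.1 ++ [(PySem.List.pyGetD edges idx ((0 : Int), (0 : Int))).2],
                     (PySem.List.pyGetD edges idx ((0 : Int), (0 : Int))).2))
                  ([edges[k].1, edges[k].2], edges[k].2)).1 =
                [edges[k].1, edges[k].2] ++
                  (pvWalk (pvTreeB n adj edges[k].2).1 (pvTreeB n adj edges[k].2).2
                    edges[k].2 (n.toNat + 1) edges[k].1).reverse.map
                    (fun idx => (PySem.List.pyGetD edges idx ((0 : Int), (0 : Int))).2) := by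
              rw [PySem.List.foldl_prod_mk
                (f := fun (acc : List Int) (idx : Int) =>
                  acc ++ [(PySem.List.pyGetD edges idx ((0 : Int), (0 : Int))).2])
                (g := fun (_ : Int) (idx : Int) =>
                  (PySem.List.pyGetD edges idx ((0 : Int), (0 : Int))).2)]
              simp only []
              rw [PySem.List.foldl_append_singleton_eq_map]
            rw [hcyc, hc]
            exact ih (k + 1) (by omega) _ _ _ hrel'
          · rw [if_neg hins, if_neg hins, hc]
            exact ih (k + 1) (by omega) _ _ _ hrel'

theorem pvTop (n : Int) (edges : List (Int × Int)) (hpre : Pre_cycle_basis n edges) :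
    cycle_basis n edges = cycle_basis_alt n edges := by
  have hg := pvAdj_good n edges hpre
  have htrees := pvTrees_spec (n := n) (pvAdj n edges) edges
  have hinit : pvRel edges.length (List.replicate edges.length none) PySem.Dict.empty := by
    refine ⟨List.length_replicate, ?_⟩
    intro bit hb0 hbm
    rw [pv_getD_replicate _ _ _ _ hb0 hbm, PySem.Dict.get?_empty]
  have := pvMain_eq n edges (pvAdj n edges) (pvTreesB n (pvAdj n edges) edges)
    ((edges.length : Int) - n + pvCount n (pvUndir n edges)) hpre hg
    (fun e he => htrees e he)
    edges.length 0 (by omega) (List.replicate edges.length none) PySem.Dict.empty [] hinit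
  simpa using this

-- ===== VERDICT (by name: the statement is the Claim_ definition above) =====
theorem cycle_basis_spec : Claim_equal_cycle_basis := by
  intro n edges _ hpre
  unfold Spec_cycle_basis
  exact pvTop n edges hpre
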